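-- pv_equiv track=rewrite | github.com/wherby/code | contest/00000c443d154/c445/q3/t3.py | helper
-- ===== SOURCE A (Python) =====
-- from math import factorial
-- from collections import Counter
-- from math import factorial
-- from collections import Counter
--
-- def helper(arr, k, result):
--     if not arr:
--         return result
--     # Count the frequency of each element in the remaining array
--     count = Counter(arr)
--     for num in sorted(set(arr)):  # Iterate through unique elements in order
--         if count[num] == 0:
--             continue
--         # Compute the number of permutations starting with 'num'
--         # Total permutations = (n-1)! / (product of (count[c]! for all c in remaining counts))
--         # Here, we adjust the counts by reducing the count of 'num' by 1
--         temp_count = count.copy()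
--         temp_count[num] -= 1
--         denominator = 1
--         for c in temp_count:
--             denominator *= factorial(temp_count[c])
--         total = factorial(len(arr) - 1) // denominator
--         if k > total:
--             k -= total
--             continue
--         # Choose 'num', reduce its count, and proceed
--         result.append(num)
--         new_arr = arr.copy()
--         new_arr.remove(num)  # Remove the first occurrence of 'num'
--         return helper(new_arr, k, result)
--     return result  # in case k is out of bounds
-- ===== SOURCE B (Python) =====
-- from math import factorial
--
-- def _runs(s):
--     # run-length encoding of a sorted list: [(value, multiplicity), ...]
--     if not s:
--         return []
--     rest = _runs(s[1:])
--     if rest and rest[0][0] == s[0]: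
--         return [(s[0], rest[0][1] + 1)] + rest[1:]
--     return [(s[0], 1)] + rest
--
-- def _pick(pairs, k, fact, D):
--     # find the value whose block contains rank k; returns (value, pairs after
--     # removing one occurrence, remaining k) or None if k exceeds all blocks
--     for i, (v, c) in enumerate(pairs):
--         branch = fact * c // D
--         if k <= branch:
--             rest = pairs[:i] + ([] if c == 1 else [(v, c - 1)]) + pairs[i + 1:]
--             return (v, rest, k)
--         k -= branch
--     return None
--
-- def _go(pairs, n, k, result):
--     while n > 0:
--         D = 1
--         for _, c in pairs:
--             D *= factorial(c)
--         pick = _pick(pairs, k, factorial(n - 1), D)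
--         if pick is None:
--             return result
--         v, pairs, k = pick
--         result.append(v)
--         n -= 1
--     return result
--
-- def helper(arr, k, result):
--     return _go(_runs(sorted(arr)), len(arr), k, result)
-- ===== Notes on version B (the rewrite author's own statement) =====
-- stated objective: faster
-- what changed: B sorts once into a run-length list of (value, multiplicity) pairs and walks it iteratively, computing each candidate's block as factorial(n-1)*count//D with one denominator product D per level, instead of A's per-level Counter rebuild, per-candidate dict copy plus full denominator re-scan, and per-level list copy/remove with recursion.
import Mathlib
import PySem

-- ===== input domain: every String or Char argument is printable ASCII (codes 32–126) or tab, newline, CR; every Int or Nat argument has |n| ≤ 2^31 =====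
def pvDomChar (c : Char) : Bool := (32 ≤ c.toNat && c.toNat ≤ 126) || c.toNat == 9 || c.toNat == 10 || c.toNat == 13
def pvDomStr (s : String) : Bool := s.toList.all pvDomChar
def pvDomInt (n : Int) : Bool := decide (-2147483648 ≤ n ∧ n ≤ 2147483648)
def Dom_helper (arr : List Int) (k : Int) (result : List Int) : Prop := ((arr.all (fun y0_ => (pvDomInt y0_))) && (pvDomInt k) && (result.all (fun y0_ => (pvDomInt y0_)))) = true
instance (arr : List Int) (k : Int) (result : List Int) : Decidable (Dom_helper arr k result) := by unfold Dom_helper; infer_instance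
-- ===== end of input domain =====

-- B replaces A's per-level Counter rebuild, per-candidate dict copy + denominator re-scan and
-- list copy/remove recursion by one sort into run-length (value, multiplicity) pairs walked
-- iteratively with a single denominator product per level (objective: faster).
-- Both A and B append the chosen values to `result` in place; the equivalence proved here is
-- about the return value (the mutation performed happens to be the same in both).

-- math.factorial (exact: both programs only ever call it on nonnegative ints)
def pyFact (n : Int) : Int := (Nat.factorial n.toNat : Int)

-- ===== PORT A =====
-- the `for num in sorted(set(arr))` loop: returns the chosen num with its residual k, or none on fall-through
def aScan (count : PySem.Dict Int Int) (arr : List Int) (nums : List Int) (k : Int) : Option (Int × Int) :=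
  match nums with
  | [] => none
  | num :: rest =>
    if count.getD num 0 == 0 then aScan count arr rest k
    else
      let temp := count.modify num 0 (· - 1)
      let denom := temp.keys.foldl (fun d c => d * pyFact (temp.getD c 0)) 1
      let total := PySem.Int.floordiv (pyFact ((arr.length : Int) - 1)) denom
      if k > total then aScan count arr rest (k - total)
      else some (num, k)

-- fuel = arr.length makes the self-recursion structural; each recursive call removes one element
def helperFuel : Nat → List Int → Int → List Int → List Int
  | 0, _, _, result => result
  | fuel + 1, arr, k, result =>
    if arr.isEmpty then result
    else
      let count := PySem.Dict.counter arr
      match aScan count arr (PySem.List.sorted (PySem.Set.ofList arr) (fun x => x)) k with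
      | none => result
      | some (num, k') =>
        helperFuel fuel ((PySem.List.remove? arr num).getD arr) k' (result ++ [num])

def helper (arr : List Int) (k : Int) (result : List Int) : List Int :=
  helperFuel arr.length arr k result

-- ===== PORT B =====
-- _runs: run-length encoding of a sorted list
def runs : List Int → List (Int × Int)
  | [] => []
  | v :: t =>
    match runs t with
    | (w, c) :: rest => if v == w then (v, c + 1) :: rest else (v, 1) :: (w, c) :: rest
    | [] => [(v, 1)]

-- _pick: find the value whose block contains rank k
def pick : List (Int × Int) → Int → Int → Int → Option (Int × List (Int × Int) × Int)
  | [], _, _, _ => none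
  | (v, c) :: t, k, fact, D =>
    let branch := PySem.Int.floordiv (fact * c) D
    if k ≤ branch then some (v, (if c == 1 then t else (v, c - 1) :: t), k)
    else
      match pick t (k - branch) fact D with
      | none => none
      | some (v', rest, k') => some (v', (v, c) :: rest, k')

-- _go: the while loop, counting n down (n = remaining length, a Nat in fact)
def go : List (Int × Int) → Nat → Int → List Int → List Int
  | _, 0, _, result => result
  | pairs, n + 1, k, result =>
    let D := pairs.foldl (fun d p => d * pyFact p.2) 1
    match pick pairs k (pyFact (n : Int)) D with
    | none => result
    | some (v, rest, k') => go rest n k' (result ++ [v])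

def helper_alt (arr : List Int) (k : Int) (result : List Int) : List Int :=
  go (runs (PySem.List.sorted arr (fun x => x))) arr.length k result

-- ===== PRECONDITION & SPEC =====
def Spec_helper (arr : List Int) (k : Int) (result : List Int) (out : List Int) : Prop := out = helper_alt arr k result
instance (arr : List Int) (k : Int) (result : List Int) (out : List Int) : Decidable (Spec_helper arr k result out) := by unfold Spec_helper; infer_instance

-- ===== CLAIM (what is proved, stated in full; the proofs are below) =====
def Claim_equal_helper : Prop := ∀ (arr : List Int) (k : Int) (result : List Int), Dom_helper arr k result → Spec_helper arr k result (helper arr k result)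

-- ===== LEMMAS AND PROOFS =====

-- removing one occurrence of `num` from the pair list, as pick builds its result
def dec : List (Int × Int) → Int → List (Int × Int)
  | [], _ => []
  | (v, c) :: t, num => if v = num then (if c = 1 then t else (v, c - 1) :: t) else (v, c) :: dec t num

-- A's denominator for candidate num (the value of aScan's let-bindings)
def denomOf (count : PySem.Dict Int Int) (num : Int) : Int :=
  let temp := count.modify num 0 (· - 1)
  temp.keys.foldl (fun d c => d * pyFact (temp.getD c 0)) 1

lemma runs_nil_iff (S : List Int) : runs S = [] ↔ S = [] := by
  cases S with
  | nil => simp [runs]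
  | cons v t =>
    simp only [runs]
    rcases h : runs t with _ | ⟨⟨w, c⟩, rest⟩
    · simp
    · show ((if (v == w) = true then (v, c + 1) :: rest else (v, 1) :: (w, c) :: rest) = []) ↔ _
      split <;> simp

lemma runs_pos (S : List Int) : ∀ p ∈ runs S, 0 < p.2 := by
  induction S with
  | nil => simp [runs]
  | cons v t ih =>
    intro p hp
    simp only [runs] at hp
    rcases h : runs t with _ | ⟨⟨w, c⟩, rest⟩ <;> rw [h] at hp
    · simp at hp; simp [hp]
    · have hc : 0 < c := ih (w, c) (by rw [h]; exact List.mem_cons_self)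
      by_cases hv : v = w
      · subst hv; simp only [BEq.rfl, if_true, List.mem_cons] at hp
        rcases hp with rfl | hp
        · simp; omega
        · exact ih p (by rw [h]; exact List.mem_cons_of_mem _ hp)
      · simp only [beq_iff_eq, hv, if_false, List.mem_cons] at hp
        rcases hp with rfl | rfl | hp
        · simp
        · exact hc
        · exact ih p (by rw [h]; exact List.mem_cons_of_mem _ hp)

lemma runs_mem (S : List Int) (v : Int) : v ∈ (runs S).map Prod.fst ↔ v ∈ S := by
  induction S with
  | nil => simp [runs]
  | cons a t ih =>
    simp only [runs]
    rcases h : runs t with _ | ⟨⟨w, c⟩, rest⟩ <;> rw [h] at ih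
    · have := (runs_nil_iff t).1 h
      subst this; simp
    · simp only [List.map_cons, List.mem_cons] at ih
      by_cases hv : a = w
      · subst hv; simp only [BEq.rfl, if_true, List.map_cons, List.mem_cons]
        constructor
        · rintro (rfl | hr)
          · exact Or.inl rfl
          · exact Or.inr (ih.1 (Or.inr hr))
        · rintro (rfl | ht)
          · exact Or.inl rfl
          · rcases ih.2 ht with rfl | hr
            · exact Or.inl rfl
            · exact Or.inr hr
      · simp only [beq_iff_eq, hv, if_false, List.map_cons, List.mem_cons]
        constructor
        · rintro (rfl | rfl | hr)
          · exact Or.inl rfl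
          · exact Or.inr (ih.1 (Or.inl rfl))
          · exact Or.inr (ih.1 (Or.inr hr))
        · rintro (rfl | ht)
          · exact Or.inl rfl
          · rcases ih.2 ht with rfl | hr
            · exact Or.inr (Or.inl rfl)
            · exact Or.inr (Or.inr hr)

lemma runs_keys_lt (S : List Int) (hs : S.Pairwise (· ≤ ·)) :
    ((runs S).map Prod.fst).Pairwise (· < ·) := by
  induction S with
  | nil => simp [runs]
  | cons v t ih =>
    rw [List.pairwise_cons] at hs
    obtain ⟨hle, ht⟩ := hs
    have ih := ih ht
    simp only [runs]
    rcases h : runs t with _ | ⟨⟨w, c⟩, rest⟩ <;> rw [h] at ih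
    · simp
    · have hwt : w ∈ t := (runs_mem t w).1 (by rw [h]; simp)
      have hvw : v ≤ w := hle w hwt
      simp only [List.map_cons, List.pairwise_cons] at ih
      by_cases hv : v = w
      · subst hv
        simp only [BEq.rfl, if_true, List.map_cons, List.pairwise_cons]
        exact ⟨ih.1, ih.2⟩
      · simp only [beq_iff_eq, hv, if_false, List.map_cons, List.pairwise_cons]
        refine ⟨?_, ih.1, ih.2⟩
        intro x hx
        rw [List.mem_cons] at hx
        rcases hx with rfl | hx
        · exact lt_of_le_of_ne hvw hv
        · exact lt_of_le_of_lt (lt_of_le_of_ne hvw hv).le (ih.1 x hx)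

lemma runs_count (S : List Int) (hs : S.Pairwise (· ≤ ·)) :
    ∀ p ∈ runs S, p.2 = (S.count p.1 : Int) := by
  induction S with
  | nil => simp [runs]
  | cons a t ih =>
    rw [List.pairwise_cons] at hs
    obtain ⟨hle, ht⟩ := hs
    have ihc := ih ht
    have hklt := runs_keys_lt t ht
    intro p hp
    simp only [runs] at hp
    rcases h : runs t with _ | ⟨⟨w, c⟩, rest⟩ <;> rw [h] at hp ihc hklt
    · have := (runs_nil_iff t).1 h
      subst this
      simp at hp; subst hp; simp
    · have hwt : w ∈ t := (runs_mem t w).1 (by rw [h]; simp)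
      simp only [List.map_cons, List.pairwise_cons] at hklt
      by_cases hv : a = w
      · subst hv
        simp only [BEq.rfl, if_true, List.mem_cons] at hp
        rcases hp with rfl | hp
        · have hcc := ihc (a, c) List.mem_cons_self
          simp only at hcc
          show c + 1 = (List.count a (a :: t) : Int)
          rw [List.count_cons_self, hcc]; push_cast; ring
        · have hx := ihc p (List.mem_cons_of_mem _ hp)
          have hpk : a < p.1 := hklt.1 p.1 (List.mem_map_of_mem hp)
          show p.2 = (List.count p.1 (a :: t) : Int)
          rw [List.count_cons, hx]
          simp [show ¬(a = p.1) from by omega]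
      · simp only [beq_iff_eq, hv, if_false, List.mem_cons] at hp
        have hanot : a ∉ t := by
          intro hat
          have hmem : a ∈ (runs t).map Prod.fst := (runs_mem t a).2 hat
          rw [h] at hmem
          simp only [List.map_cons, List.mem_cons] at hmem
          rcases hmem with rfl | hr
          · exact hv rfl
          · have hwa : w < a := hklt.1 a hr
            have := hle w hwt
            omega
        rcases hp with rfl | rfl | hp
        · show (1 : Int) = (List.count a (a :: t) : Int)
          rw [List.count_cons_self, List.count_eq_zero_of_not_mem hanot]
          simp
        · have hx := ihc (w, c) List.mem_cons_self
          simp only at hx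
          show c = (List.count w (a :: t) : Int)
          rw [List.count_cons, hx]
          simp [hv]
        · have hx := ihc p (List.mem_cons_of_mem _ hp)
          have hpt : p.1 ∈ t := (runs_mem t p.1).1
            (by rw [h]; exact List.mem_cons_of_mem _ (List.mem_map_of_mem hp))
          have hne : p.1 ≠ a := fun he => hanot (he ▸ hpt)
          show p.2 = (List.count p.1 (a :: t) : Int)
          rw [List.count_cons, hx]
          simp [Ne.symm hne]

lemma runs_erase (S : List Int) (hs : S.Pairwise (· ≤ ·)) (num : Int) (hm : num ∈ S) :
    runs (S.erase num) = dec (runs S) num := by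
  induction S with
  | nil => simp at hm
  | cons a t ih =>
    rw [List.pairwise_cons] at hs
    obtain ⟨hle, ht⟩ := hs
    by_cases ha : a = num
    · subst ha
      rw [List.erase_cons_head]
      show runs t = dec (runs (a :: t)) a
      simp only [runs]
      rcases h : runs t with _ | ⟨⟨w, c⟩, rest⟩
      · simp [dec]
      · have hc : 0 < c := runs_pos t (w, c) (by rw [h]; exact List.mem_cons_self)
        by_cases hw : a = w
        · subst hw
          simp only [BEq.rfl, if_true, dec]
          rw [if_neg (by omega)]
          norm_num
        · simp only [beq_iff_eq, hw, if_false, dec]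
          simp
    · have hnum : num ∈ t := by
        rcases List.mem_cons.1 hm with rfl | h
        · exact absurd rfl ha
        · exact h
      rw [List.erase_cons_tail (by simpa using ha)]
      have ihe := ih ht hnum
      show runs (a :: t.erase num) = dec (runs (a :: t)) num
      rcases h : runs t with _ | ⟨⟨w, c⟩, rest⟩
      · exact absurd ((runs_nil_iff t).1 h ▸ hnum) (List.not_mem_nil)
      · have hc : 0 < c := runs_pos t (w, c) (by rw [h]; exact List.mem_cons_self)
        have hwt : w ∈ t := (runs_mem t w).1 (by rw [h]; simp)
        have haw : a ≤ w := hle w hwt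
        have hklt := runs_keys_lt t ht
        rw [h] at ihe hklt
        simp only [List.map_cons, List.pairwise_cons] at hklt
        simp only [runs, h]
        by_cases hw : a = w
        · subst hw
          have hL : runs (t.erase num) = (a, c) :: dec rest num := by
            rw [ihe]; simp only [dec, if_neg ha]
          rw [hL]
          simp [dec, ha]
        · simp only [beq_iff_eq, hw, if_false]
          have hRHS : dec ((a, 1) :: (w, c) :: rest) num = (a, 1) :: dec ((w, c) :: rest) num := by
            simp only [dec, if_neg ha]
          rw [hRHS, ← ihe]
          by_cases hwn : w = num
          · by_cases hc1 : c = 1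
            · subst hc1
              have hL : runs (t.erase num) = rest := by rw [ihe]; simp [dec, hwn]
              rw [hL] at ihe ⊢
              rcases hr : rest with _ | ⟨⟨u, d⟩, rest2⟩
              · simp
              · have hu : w < u := hklt.1 u (by rw [hr]; simp)
                have haw' : a < w := lt_of_le_of_ne haw hw
                simp only [← hr]
                rw [hr]
                simp [show ¬(a = u) from by omega]
            · have hL : runs (t.erase num) = (w, c - 1) :: rest := by
                rw [ihe]; simp [dec, hwn, hc1]
              rw [hL]
              simp [hw]
          · have hL : runs (t.erase num) = (w, c) :: dec rest num := by
              rw [ihe]; simp [dec, hwn]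
            rw [hL]
            simp [hw]

lemma sorted_set_eq_keys (arr : List Int) :
    PySem.List.sorted (PySem.Set.ofList arr) (fun x => x) =
      (runs (PySem.List.sorted arr (fun x => x))).map Prod.fst := by
  apply PySem.List.sorted_eq_of_perm_of_pairwise_lt
  · rw [List.perm_ext_iff_of_nodup _ (PySem.Set.nodup_ofList arr)]
    · intro v
      rw [runs_mem, PySem.Set.mem_ofList]
      exact ⟨fun h => (PySem.List.sorted_perm arr (fun x => x) false).mem_iff.1 h,
        fun h => (PySem.List.sorted_perm arr (fun x => x) false).mem_iff.2 h⟩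
    · exact (runs_keys_lt _ (PySem.List.sorted_pairwise arr (fun x => x))).nodup
  · exact runs_keys_lt _ (PySem.List.sorted_pairwise arr (fun x => x))

lemma sorted_erase (arr : List Int) (num : Int) :
    PySem.List.sorted (arr.erase num) (fun x => x) =
      (PySem.List.sorted arr (fun x => x)).erase num := by
  apply PySem.List.eq_of_perm_of_pairwise_le_of_injective (fun x => x) (fun a b h => h)
  · exact (PySem.List.sorted_perm _ _ false).trans
      (((PySem.List.sorted_perm arr (fun x => x) false).symm.erase num).symm).symm |>.symm |>.symm
  · exact PySem.List.sorted_pairwise _ _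
  · exact ((PySem.List.sorted_pairwise arr (fun x => x)).sublist (List.erase_sublist))

lemma one_le_pyFact (n : Int) : 1 ≤ pyFact n := by
  unfold pyFact; exact_mod_cast Nat.one_le_iff_ne_zero.2 (Nat.factorial_ne_zero _)

lemma pyFact_eq_mul (n : Int) (h : 0 < n) : pyFact n = n * pyFact (n - 1) := by
  unfold pyFact
  have h1 : n.toNat = (n - 1).toNat + 1 := by omega
  rw [h1, Nat.factorial_succ]
  push_cast
  have h2 : (((n - 1).toNat : Int)) = n - 1 := by omega
  rw [h2]; ring

lemma foldl_mul_eq_prod {α : Type} (l : List α) (f : α → Int) (a : Int) :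
    l.foldl (fun d x => d * f x) a = a * (l.map f).prod := by
  induction l generalizing a with
  | nil => simp
  | cons x t ih => simp only [List.foldl_cons, List.map_cons, List.prod_cons, ih]; ring

lemma denom_pos (count : PySem.Dict Int Int) (num : Int) : 0 < denomOf count num := by
  unfold denomOf
  rw [foldl_mul_eq_prod, one_mul]
  refine lt_of_lt_of_le zero_lt_one (List.one_le_prod ?_)
  intro x hx
  obtain ⟨v, _, rfl⟩ := List.mem_map.1 hx
  exact one_le_pyFact _

lemma prod_dec (K : List Int) (f f' : Int → Int) (num c : Int) (hnd : K.Nodup) (hm : num ∈ K)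
    (hnum : f num = c * f' num) (hothers : ∀ v ∈ K, v ≠ num → f v = f' v) :
    (K.map f).prod = c * (K.map f').prod := by
  induction K with
  | nil => simp at hm
  | cons a t ih =>
    rw [List.nodup_cons] at hnd
    rcases List.mem_cons.1 hm with rfl | hmt
    · simp only [List.map_cons, List.prod_cons, hnum]
      have : t.map f = t.map f' := List.map_congr_left
        (fun v hv => hothers v (List.mem_cons_of_mem _ hv) (fun he => hnd.1 (he ▸ hv)))
      rw [this]; ring
    · have hne : a ≠ num := fun he => hnd.1 (he ▸ hmt)
      simp only [List.map_cons, List.prod_cons,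
        ih hnd.2 hmt (fun v hv hvn => hothers v (List.mem_cons_of_mem _ hv) hvn),
        hothers a List.mem_cons_self hne]
      ring

lemma D_eq_mul_denom (arr : List Int) (num : Int) (hm : num ∈ arr) :
    (runs (PySem.List.sorted arr (fun x => x))).foldl (fun d p => d * pyFact p.2) 1
      = (arr.count num : Int) * denomOf (PySem.Dict.counter arr) num := by
  have hS := PySem.List.sorted_pairwise arr (fun x => x)
  set S := PySem.List.sorted arr (fun x => x) with hSdef
  have hSperm : S.Perm arr := PySem.List.sorted_perm arr (fun x => x) false
  -- LHS as a product over the keys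
  rw [foldl_mul_eq_prod, one_mul]
  have hmapeq : (runs S).map (fun p => pyFact p.2)
      = ((runs S).map Prod.fst).map (fun v => pyFact (arr.count v : Int)) := by
    rw [List.map_map]
    exact List.map_congr_left (fun p hp => by
      simp only [Function.comp_apply]
      rw [runs_count S hS p hp, hSperm.count_eq])
  rw [hmapeq]
  -- RHS: keys and lookups of temp
  unfold denomOf
  rw [foldl_mul_eq_prod, one_mul]
  have hcont : (PySem.Dict.counter arr).contains num = true := by
    rw [PySem.Dict.contains_counter]; simpa using hm
  have hkeys : ((PySem.Dict.counter arr).modify num 0 (· - 1)).keys = PySem.Set.ofList arr := by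
    rw [PySem.Dict.keys_modify, PySem.Dict.keys_insert_of_contains _ _ hcont,
      PySem.Dict.keys_counter]
  rw [hkeys]
  have hperm : ((runs S).map Prod.fst).Perm (PySem.Set.ofList arr) := by
    rw [← sorted_set_eq_keys]
    exact PySem.List.sorted_perm _ _ false
  rw [(hperm.map (fun v => pyFact (arr.count v : Int))).prod_eq]
  apply prod_dec _ _ _ _ _ (PySem.Set.nodup_ofList arr) ((PySem.Set.mem_ofList arr num).2 hm)
  · rw [PySem.Dict.getD_modify, if_pos rfl, PySem.Dict.getD_counter]
    exact pyFact_eq_mul _ (by exact_mod_cast List.count_pos_iff.2 hm)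
  · intro v hv hvn
    rw [PySem.Dict.getD_modify, if_neg hvn, PySem.Dict.getD_counter]

lemma aScan_cons (count : PySem.Dict Int Int) (arr : List Int) (num : Int) (rest : List Int) (k : Int) :
    aScan count arr (num :: rest) k =
      if count.getD num 0 == 0 then aScan count arr rest k
      else if k > PySem.Int.floordiv (pyFact ((arr.length : Int) - 1)) (denomOf count num) then
        aScan count arr rest (k - PySem.Int.floordiv (pyFact ((arr.length : Int) - 1)) (denomOf count num))
      else some (num, k) := rfl

lemma scan_eq (count : PySem.Dict Int Int) (arr : List Int) (fact D : Int)
    (Q : List (Int × Int))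
    (hQ : ∀ p ∈ Q, count.getD p.1 0 = p.2 ∧ 0 < p.2 ∧
      PySem.Int.floordiv (pyFact ((arr.length : Int) - 1)) (denomOf count p.1)
        = PySem.Int.floordiv (fact * p.2) D)
    (hnd : (Q.map Prod.fst).Nodup) :
    ∀ k, (aScan count arr (Q.map Prod.fst) k = none ∧ pick Q k fact D = none) ∨
      (∃ num k', num ∈ Q.map Prod.fst ∧ aScan count arr (Q.map Prod.fst) k = some (num, k') ∧
        pick Q k fact D = some (num, dec Q num, k')) := by
  induction Q with
  | nil => intro k; left; exact ⟨rfl, rfl⟩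
  | cons p t ih =>
    obtain ⟨v, c⟩ := p
    intro k
    obtain ⟨hget, hpos, hbr⟩ := hQ (v, c) List.mem_cons_self
    simp only at hget hpos hbr
    rw [List.map_cons, List.nodup_cons] at hnd
    have hnotin : v ∉ t.map Prod.fst := hnd.1
    have ih' := ih (fun p hp => hQ p (List.mem_cons_of_mem _ hp)) hnd.2
    rw [List.map_cons, aScan_cons, if_neg (by simp [hget]; omega), hbr]
    simp only [pick]
    by_cases hk : k ≤ PySem.Int.floordiv (fact * c) D
    · right
      refine ⟨v, k, List.mem_cons_self, ?_, ?_⟩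
      · rw [if_neg (by omega)]
      · rw [if_pos hk]
        simp only [dec]
        by_cases hc1 : c = 1 <;> simp [hc1]
    · rw [if_pos (by omega), if_neg hk]
      rcases ih' (k - PySem.Int.floordiv (fact * c) D) with ⟨h1, h2⟩ | ⟨num, k', hmem, h1, h2⟩
      · left; exact ⟨h1, by rw [h2]⟩
      · right
        refine ⟨num, k', List.mem_cons_of_mem _ hmem, h1, ?_⟩
        rw [h2]
        have hvnum : v ≠ num := fun he => hnotin (he ▸ hmem)
        simp only [dec, if_neg hvnum]

lemma remove_getD (arr : List Int) (num : Int) (hm : num ∈ arr) :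
    (PySem.List.remove? arr num).getD arr = arr.erase num := by
  simp only [PySem.List.remove?]
  obtain ⟨i, hi⟩ := Option.isSome_iff_exists.1 (List.isSome_idxOf?.2 hm)
  have hidx : arr.idxOf num = i := by rw [List.idxOf_eq_getD_idxOf?, hi]; rfl
  rw [hi, Option.map_some, Option.getD_some, ← hidx]
  exact List.eraseIdx_idxOf_eq_erase num arr

lemma floordiv_cancel (F c d : Int) (hc : 0 < c) (hd : 0 < d) :
    PySem.Int.floordiv F d = PySem.Int.floordiv (F * c) (c * d) := by
  rw [PySem.Int.floordiv_eq_ediv_of_pos hd, PySem.Int.floordiv_eq_ediv_of_pos (by positivity),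
    mul_comm F c, Int.mul_ediv_mul_of_pos _ _ hc]

lemma main_eq (n : Nat) : ∀ (arr : List Int) (k : Int) (res : List Int), arr.length = n →
    helperFuel n arr k res = go (runs (PySem.List.sorted arr (fun x => x))) n k res := by
  induction n with
  | zero => intro arr k res _; rfl
  | succ n ih =>
    intro arr k res hlen
    have hne : arr ≠ [] := by intro h; subst h; simp at hlen
    have hS := PySem.List.sorted_pairwise arr (fun x => x)
    have hSperm := PySem.List.sorted_perm arr (fun x => x) false
    set S := PySem.List.sorted arr (fun x => x) with hSdef
    set P := runs S with hPdef
    set D := P.foldl (fun d p => d * pyFact p.2) 1 with hDdef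
    -- hypotheses of the scan lemma
    have hQ : ∀ p ∈ P, (PySem.Dict.counter arr).getD p.1 0 = p.2 ∧ 0 < p.2 ∧
        PySem.Int.floordiv (pyFact ((arr.length : Int) - 1)) (denomOf (PySem.Dict.counter arr) p.1)
          = PySem.Int.floordiv (pyFact (n : Int) * p.2) D := by
      intro p hp
      have hcnt := runs_count S hS p hp
      have hmemS : p.1 ∈ S := (runs_mem S p.1).1 (List.mem_map_of_mem hp)
      have hmemA : p.1 ∈ arr := hSperm.mem_iff.1 hmemS
      have hcarr : p.2 = (arr.count p.1 : Int) := by rw [hcnt, hSperm.count_eq]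
      have hcpos : 0 < p.2 := runs_pos S p hp
      refine ⟨by rw [PySem.Dict.getD_counter, hcarr], hcpos, ?_⟩
      have hDden : D = p.2 * denomOf (PySem.Dict.counter arr) p.1 := by
        rw [hDdef, hPdef, hSdef, D_eq_mul_denom arr p.1 hmemA, hcarr]
      rw [hDden, hlen]
      have : ((n : Int) + 1 - 1) = (n : Int) := by ring
      push_cast
      rw [this]
      exact floordiv_cancel _ _ _ hcpos (denom_pos _ _)
    have hnd : (P.map Prod.fst).Nodup := (runs_keys_lt S hS).nodup
    have hscan := scan_eq (PySem.Dict.counter arr) arr (pyFact (n : Int)) D P hQ hnd k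
    -- unfold one step of each side
    have hfuel : helperFuel (n + 1) arr k res =
        match aScan (PySem.Dict.counter arr) arr (P.map Prod.fst) k with
        | none => res
        | some (num, k') =>
          helperFuel n ((PySem.List.remove? arr num).getD arr) k' (res ++ [num]) := by
      rw [helperFuel, if_neg (by simpa using hne)]
      rw [hPdef, hSdef, ← sorted_set_eq_keys]
    have hgo : go P (n + 1) k res =
        match pick P k (pyFact (n : Int)) D with
        | none => res
        | some (v, rest, k') => go rest n k' (res ++ [v]) := by
      rw [go]
    rcases hscan with ⟨h1, h2⟩ | ⟨num, k', hmem, h1, h2⟩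
    · rw [hfuel, hgo, h1, h2]
    · rw [hfuel, hgo, h1, h2]
      simp only
      have hmemA : num ∈ arr := hSperm.mem_iff.1 ((runs_mem S num).1 hmem)
      rw [remove_getD arr num hmemA]
      have hlen' : (arr.erase num).length = n := by
        rw [List.length_erase_of_mem hmemA, hlen]; omega
      rw [ih (arr.erase num) k' (res ++ [num]) hlen']
      congr 1
      rw [hPdef, ← runs_erase S hS num (hSperm.mem_iff.2 hmemA), ← sorted_erase]

-- ===== VERDICT (by name: the statement is the Claim_ definition above) =====
theorem helper_spec : Claim_equal_helper := by
  intro arr k result _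
  unfold Spec_helper helper helper_alt
  exact main_eq arr.length arr k result rfl
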